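-- pv_equiv track=rewrite | github.com/GavinFu7/RHYME-CTRL | rhyme_core.py | assign_colors
-- ===== SOURCE A (Python) =====
-- from typing import List, Optional, Tuple, Dict
--
-- PALETTE = [
--     "#1f77b4", "#ff7f0e", "#2ca02c", "#d62728",
--     "#9467bd", "#8c564b", "#e377c2", "#7f7f7f",
--     "#bcbd22", "#17becf", "#ff6f61", "#6b5b95",
--     "#88b04b", "#f7cac9", "#92a8d1", "#955251",
--     "#b565a7", "#009b77", "#dd4124", "#45b8ac",
--     "#e6b333", "#4a4e4d", "#0e9aa7", "#b3cde0",
-- ]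
--
-- def assign_colors(lines_tokens: List[List[dict]]) -> Dict[int, str]:
--     """
--     Build a mapping {group_id -> color_hex} based on the PALETTE,
--     only for actually-used groups.
--     """
--     used_groups = []
--     for line in lines_tokens:
--         for tok in line:
--             gid = tok.get("group")
--             if gid is not None and gid not in used_groups:
--                 used_groups.append(gid)
--
--     return {gid: PALETTE[i % len(PALETTE)] for i, gid in enumerate(sorted(used_groups))}
-- ===== SOURCE B (Python) =====
-- from typing import List, Dict
--
-- PALETTE = [
--     "#1f77b4", "#ff7f0e", "#2ca02c", "#d62728",
--     "#9467bd", "#8c564b", "#e377c2", "#7f7f7f",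
--     "#bcbd22", "#17becf", "#ff6f61", "#6b5b95",
--     "#88b04b", "#f7cac9", "#92a8d1", "#955251",
--     "#b565a7", "#009b77", "#dd4124", "#45b8ac",
--     "#e6b333", "#4a4e4d", "#0e9aa7", "#b3cde0",
-- ]
--
-- def assign_colors(lines_tokens: List[List[dict]]) -> Dict[int, str]:
--     # Collect every used group id KEEPING duplicates, sort the whole multiset once,
--     # then one linear pass: a gid not yet a key gets the next palette color.
--     all_gids = sorted(
--         tok.get("group")
--         for line in lines_tokens
--         for tok in line
--         if tok.get("group") is not None
--     )
--     result = {}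
--     for gid in all_gids:
--         if gid not in result:
--             result[gid] = PALETTE[len(result) % len(PALETTE)]
--     return result
-- ===== Notes on version B (the rewrite author's own statement) =====
-- stated objective: alternative
-- what changed: B sorts the full multiset of group ids once and assigns colors in a single boundary-detecting pass keyed by the growing dict, instead of A's dedup-by-list-membership scan followed by sorting the distinct ids and enumerating.
import Mathlib
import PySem

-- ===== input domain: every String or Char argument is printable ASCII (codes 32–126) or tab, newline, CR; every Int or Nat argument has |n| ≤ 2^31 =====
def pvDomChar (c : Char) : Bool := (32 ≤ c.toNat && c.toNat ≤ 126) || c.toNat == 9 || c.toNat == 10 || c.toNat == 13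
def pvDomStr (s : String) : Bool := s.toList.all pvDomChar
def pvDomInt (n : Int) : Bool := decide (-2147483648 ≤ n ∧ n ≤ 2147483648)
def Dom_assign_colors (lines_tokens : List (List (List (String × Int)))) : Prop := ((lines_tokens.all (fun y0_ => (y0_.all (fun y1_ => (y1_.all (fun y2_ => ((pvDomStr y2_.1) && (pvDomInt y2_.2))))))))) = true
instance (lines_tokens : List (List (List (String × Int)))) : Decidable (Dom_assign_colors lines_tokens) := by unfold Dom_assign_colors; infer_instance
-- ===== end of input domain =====

-- B replaces A's dedup-by-membership + sort-distinct + enumerate by sorting the full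
-- multiset of group ids once and assigning colors in one boundary-detecting pass.

def pvPalette : List String := [
  "#1f77b4", "#ff7f0e", "#2ca02c", "#d62728",
  "#9467bd", "#8c564b", "#e377c2", "#7f7f7f",
  "#bcbd22", "#17becf", "#ff6f61", "#6b5b95",
  "#88b04b", "#f7cac9", "#92a8d1", "#955251",
  "#b565a7", "#009b77", "#dd4124", "#45b8ac",
  "#e6b333", "#4a4e4d", "#0e9aa7", "#b3cde0"]

-- ===== PORT A =====
-- The dict comprehension's keys (sorted used_groups) are distinct, so its items are
-- exactly the pairs in order; PALETTE[i % len(PALETTE)] is always in range, so getD is exact.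
def assign_colors (lines_tokens : List (List (List (String × Int)))) : List (Int × String) :=
  let used_groups := lines_tokens.foldl (fun used line =>
    line.foldl (fun used tok =>
      match PySem.Dict.get? (PySem.Dict.mk tok) "group" with
      | some gid => if used.contains gid then used else used ++ [gid]
      | none => used) used) []
  (PySem.List.enumerate (PySem.List.sorted used_groups (fun x => x) false)).map
    (fun p => (p.2, pvPalette.getD ((PySem.Int.mod p.1 (pvPalette.length : Int)).toNat) ""))

-- ===== PORT B =====
-- result is a dict into which only NEW keys are inserted, so each insert appends:
-- ported as the association list itself; 'gid not in result' is key membership.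
def assign_colors_alt (lines_tokens : List (List (List (String × Int)))) : List (Int × String) :=
  let all_gids := PySem.List.sorted
    (lines_tokens.flatMap (fun line =>
      line.filterMap (fun tok => PySem.Dict.get? (PySem.Dict.mk tok) "group")))
    (fun x => x) false
  all_gids.foldl (fun res gid =>
    if (res.map Prod.fst).contains gid then res
    else res ++ [(gid, pvPalette.getD (res.length % pvPalette.length) "")]) []

-- ===== PRECONDITION & SPEC =====
def Spec_assign_colors (lines_tokens : List (List (List (String × Int)))) (out : List (Int × String)) : Prop := out = assign_colors_alt lines_tokens
instance (lines_tokens : List (List (List (String × Int)))) (out : List (Int × String)) : Decidable (Spec_assign_colors lines_tokens out) := by unfold Spec_assign_colors; infer_instance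

-- ===== CLAIM (what is proved, stated in full; the proofs are below) =====
def Claim_equal_assign_colors : Prop := ∀ (lines_tokens : List (List (List (String × Int)))), Dom_assign_colors lines_tokens → Spec_assign_colors lines_tokens (assign_colors lines_tokens)

-- ===== LEMMAS AND PROOFS =====

-- first-occurrence filter of elements not already "seen"
def pvSieve (seen : List Int) : List Int → List Int
  | [] => []
  | g :: t => if seen.contains g then pvSieve seen t else g :: pvSieve (seen ++ [g]) t

-- canonical color assignment along a list, counter n
def pvBuild : List Int → Nat → List (Int × String)
  | [], _ => []
  | g :: t, n => (g, pvPalette.getD (n % pvPalette.length) "") :: pvBuild t (n + 1)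

theorem mem_pvSieve (l : List Int) : ∀ (seen : List Int) (x : Int),
    x ∈ pvSieve seen l ↔ x ∈ l ∧ x ∉ seen := by
  induction l with
  | nil => simp [pvSieve]
  | cons g t ih =>
    intro seen x
    by_cases hg : g ∈ seen <;>
      simp [pvSieve, hg, ih] <;>
      by_cases hxg : x = g <;> subst_eqs <;> tauto

theorem nodup_pvSieve (l : List Int) : ∀ seen : List Int, (pvSieve seen l).Nodup := by
  induction l with
  | nil => intro seen; simp [pvSieve]
  | cons g t ih =>
    intro seen
    by_cases hg : g ∈ seen
    · simpa [pvSieve, hg] using ih seen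
    · simp only [pvSieve, List.contains_eq_mem, hg, decide_false, Bool.false_eq_true, if_false]
      refine List.nodup_cons.mpr ⟨fun hmem => ?_, ih _⟩
      have := (mem_pvSieve t (seen ++ [g]) g).mp hmem
      simp at this

theorem sublist_pvSieve (l : List Int) : ∀ seen : List Int, (pvSieve seen l).Sublist l := by
  induction l with
  | nil => intro seen; simp [pvSieve]
  | cons g t ih =>
    intro seen
    by_cases hg : g ∈ seen
    · simpa [pvSieve, hg] using (ih seen).cons g
    · simpa [pvSieve, hg] using (ih (seen ++ [g])).cons₂ g

-- A's inner token loop = fold over the filterMapped group ids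
theorem foldA_inner (line : List (List (String × Int))) : ∀ u : List Int,
    line.foldl (fun used tok =>
      match PySem.Dict.get? (PySem.Dict.mk tok) "group" with
      | some gid => if used.contains gid then used else used ++ [gid]
      | none => used) u
    = (line.filterMap (fun tok => PySem.Dict.get? (PySem.Dict.mk tok) "group")).foldl
        (fun used gid => if used.contains gid then used else used ++ [gid]) u := by
  induction line with
  | nil => intro u; rfl
  | cons tok t ih =>
    intro u
    cases h : PySem.Dict.get? (PySem.Dict.mk tok) "group" with
    | none => simp only [List.foldl_cons, List.filterMap_cons, h]; exact ih u
    | some gid =>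
      simp only [List.foldl_cons, List.filterMap_cons, h]
      exact ih _

-- A's nested loops = fold over the flattened group-id list
theorem foldl_flatMap_step {β : Type} (f : β → List Int) (step : List Int → Int → List Int)
    (t : List β) : ∀ u, t.foldl (fun u line => (f line).foldl step u) u
      = (t.flatMap f).foldl step u := by
  induction t with
  | nil => intro u; rfl
  | cons line t ih =>
    intro u
    simp only [List.foldl_cons, List.flatMap_cons, List.foldl_append, ih]

theorem foldA_outer (lt : List (List (List (String × Int)))) : ∀ u : List Int,
    lt.foldl (fun used line =>
      line.foldl (fun used tok =>
        match PySem.Dict.get? (PySem.Dict.mk tok) "group" with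
        | some gid => if used.contains gid then used else used ++ [gid]
        | none => used) used) u
    = (lt.flatMap (fun line =>
        line.filterMap (fun tok => PySem.Dict.get? (PySem.Dict.mk tok) "group"))).foldl
        (fun used gid => if used.contains gid then used else used ++ [gid]) u := by
  intro u
  simp only [foldA_inner]
  exact foldl_flatMap_step _ _ lt u

-- the append-if-new fold is seen-filtered first-occurrence dedup
theorem foldA_sieve (l : List Int) : ∀ u : List Int,
    l.foldl (fun used gid => if used.contains gid then used else used ++ [gid]) u
    = u ++ pvSieve u l := by
  induction l with
  | nil => intro u; simp [pvSieve]
  | cons g t ih =>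
    intro u
    rw [List.foldl_cons, ih]
    by_cases hg : g ∈ u
    · simp [pvSieve, hg]
    · simp [pvSieve, hg]

-- B's insert-if-new fold builds colors along the sieve of the remaining list
theorem foldB_build (l : List Int) : ∀ res : List (Int × String),
    l.foldl (fun res gid =>
      if (res.map Prod.fst).contains gid then res
      else res ++ [(gid, pvPalette.getD (res.length % pvPalette.length) "")]) res
    = res ++ pvBuild (pvSieve (res.map Prod.fst) l) res.length := by
  induction l with
  | nil => intro res; simp [pvSieve, pvBuild]
  | cons g t ih =>
    intro res
    rw [List.foldl_cons, ih]
    by_cases hg : g ∈ res.map Prod.fst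
    · simp [pvSieve, hg]
    · simp [pvSieve, hg, pvBuild, List.append_assoc]

-- Python i % 24 on a nonnegative enumerate index is the Nat mod
theorem pymod_natCast (n : Nat) (m : Nat) (hm : 0 < m) :
    (PySem.Int.mod (n : Int) (m : Int)).toNat = n % m := by
  simp only [PySem.Int.mod]
  have hm' : (0:Int) ≤ (m:Int) := by positivity
  rw [Int.fmod_eq_emod, if_pos (Or.inl hm')]
  omega

-- the enumerate-and-map comprehension is pvBuild
theorem enum_map_build (l : List Int) : ∀ n : Nat,
    (PySem.List.enumerate l (n : Int)).map
      (fun p => (p.2, pvPalette.getD ((PySem.Int.mod p.1 (pvPalette.length : Int)).toNat) ""))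
    = pvBuild l n := by
  induction l with
  | nil => intro n; simp [PySem.List.enumerate, pvBuild]
  | cons g t ih =>
    intro n
    rw [PySem.List.enumerate_cons, List.map_cons]
    have : ((n : Int) + 1) = ((n + 1 : Nat) : Int) := by push_cast; ring
    rw [this, ih (n + 1)]
    have h2 := pymod_natCast n pvPalette.length (by simp [pvPalette])
    simp only [pvBuild]
    rw [h2]

-- sieving after sorting = sorting the sieve: both are the sorted list of distinct elements
theorem sieve_sorted_eq (R : List Int) :
    pvSieve [] (PySem.List.sorted R (fun x => x) false)
    = PySem.List.sorted (pvSieve [] R) (fun x => x) false := by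
  set T := PySem.List.sorted R (fun x => x) false with hT
  set X := pvSieve [] T with hX
  set Y := PySem.List.sorted (pvSieve [] R) (fun x => x) false with hY
  have hXnd : X.Nodup := nodup_pvSieve T []
  have hYnd : Y.Nodup := by
    have hperm : Y.Perm (pvSieve [] R) := PySem.List.sorted_perm ..
    exact hperm.nodup_iff.mpr (nodup_pvSieve R [])
  have hmem : ∀ x, x ∈ X ↔ x ∈ Y := by
    intro x
    simp [hX, hT, hY, mem_pvSieve, PySem.List.mem_sorted]
  have hperm : X.Perm Y := (List.perm_ext_iff_of_nodup hXnd hYnd).mpr hmem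
  have hXs : X.Pairwise (· ≤ ·) := by
    have hTp : T.Pairwise (· ≤ ·) := by
      simpa using PySem.List.sorted_pairwise (xs := R) (key := fun x => x)
    exact hTp.sublist (sublist_pvSieve T [])
  have hYs : Y.Pairwise (· ≤ ·) := by
    simpa using PySem.List.sorted_pairwise (xs := pvSieve [] R) (key := fun x => x)
  exact hperm.eq_of_pairwise (fun a b _ _ h1 h2 => le_antisymm h1 h2) hXs hYs

-- ===== VERDICT (by name: the statement is the Claim_ definition above) =====
theorem assign_colors_spec : Claim_equal_assign_colors := by
  intro lt _
  unfold Spec_assign_colors assign_colors assign_colors_alt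
  rw [foldA_outer, foldA_sieve, List.nil_append]
  rw [show ((0 : Int)) = ((0 : Nat) : Int) from rfl, enum_map_build]
  rw [foldB_build, List.nil_append, List.map_nil, ← sieve_sorted_eq]
  rfl
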